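-- pv_equiv track=rewrite | github.com/Kanpamil/PK | LAB2/RSA.py | find_coprime_prime
-- ===== SOURCE A (Python) =====
-- import math
--
-- def sito(limit):
--     primes = []
--     is_prime = [True] * (limit + 1)
--     is_prime[0] = is_prime[1] = False
--
--     for num in range(2, limit + 1):
--         if is_prime[num]:
--             primes.append(num)
--             for multiple in range(num * num, limit + 1, num):
--                 is_prime[multiple] = False
--
--     return primes
--
-- def find_coprime_prime(phi):
--     if phi < 2:
--         raise ValueError("Argument musi być większy lub równy 2")
--
--     primes = sito(phi)
--
--     for prime in primes:
--         if math.gcd(phi, prime) == 1: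
--             return prime
--
--     raise RuntimeError("Nie znaleziono odpowiedniej liczby pierwszej")
-- ===== SOURCE B (Python) =====
-- def is_prime(n):
--     return n >= 2 and all(n % d != 0 for d in range(2, n))
--
-- def find_coprime_prime(phi):
--     if phi < 2:
--         raise ValueError("Argument musi byc wiekszy lub rowny 2")
--     for p in range(2, phi + 2):
--         if is_prime(p) and phi % p != 0:
--             return p
--     raise RuntimeError("Nie znaleziono odpowiedniej liczby pierwszej")
-- ===== Notes on version B (the rewrite author's own statement) =====
-- stated objective: faster
-- what changed: Instead of sieving all primes up to phi and scanning them with gcd, B walks the candidates upward, testing each for primality by trial division, and returns the first prime that does not divide phi; since that prime is tiny (the product of the primes dividing phi is at most phi), no sieve of size phi is ever built.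
-- crash fix: For phi = 2 A raises RuntimeError (every prime not exceeding phi divides phi) while B returns 3, the smallest prime coprime to phi; on smaller phi both raise ValueError. — e.g. on find_coprime_prime(2): A raises RuntimeError, B returns 3
import Mathlib
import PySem

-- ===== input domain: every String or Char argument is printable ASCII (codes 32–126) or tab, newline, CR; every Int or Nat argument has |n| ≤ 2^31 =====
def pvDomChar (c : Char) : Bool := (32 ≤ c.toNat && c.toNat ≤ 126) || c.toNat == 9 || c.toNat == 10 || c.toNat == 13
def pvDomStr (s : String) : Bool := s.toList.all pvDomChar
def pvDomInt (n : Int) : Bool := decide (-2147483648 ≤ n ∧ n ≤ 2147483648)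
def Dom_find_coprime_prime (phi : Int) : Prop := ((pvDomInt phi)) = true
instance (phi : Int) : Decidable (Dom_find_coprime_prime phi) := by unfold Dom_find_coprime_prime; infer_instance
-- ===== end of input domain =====

-- B replaces A's full Sieve-of-Eratosthenes-up-to-phi + gcd scan by incremental trial-division
-- primality tests on candidates 2,3,4,… (the answer is tiny), returning the first prime not
-- dividing phi; objective: faster. On phi = 2 A raises RuntimeError while B returns 3 (see Raises_).

-- ===== PORT A =====
-- inner loop 'for multiple in range(num*num, limit+1, num): is_prime[multiple] = False'
def pyMark (isp : Array Bool) (m step limit : Nat) : Array Bool :=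
  if _h : 0 < step ∧ m ≤ limit then
    pyMark (isp.setIfInBounds m false) (m + step) step limit
  else isp
termination_by limit + 1 - m
decreasing_by omega

-- outer loop 'for num in range(2, limit+1): …'
def sitoLoop (limit num : Nat) (isp : Array Bool) (primes : List Nat) : List Nat :=
  if _h : num ≤ limit then
    if isp.getD num false then
      sitoLoop limit (num + 1) (pyMark isp (num * num) num limit) (primes ++ [num])
    else
      sitoLoop limit (num + 1) isp primes
  else primes
termination_by limit + 1 - num

def sito (limit : Nat) : List Nat :=
  sitoLoop limit 2
    (((Array.replicate (limit + 1) true).setIfInBounds 0 false).setIfInBounds 1 false) []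

def find_coprime_prime (phi : Int) : Int :=
  if phi < 2 then 0   -- raise ValueError (outside Pre_)
  else
    match (sito phi.toNat).find? (fun p : Nat => Int.gcd phi (p : Int) == 1) with
    | some p => (p : Int)
    | none => 0       -- raise RuntimeError (outside Pre_)

-- ===== PORT B =====
-- 'n >= 2 and all(n % d != 0 for d in range(2, n))'
def is_prime_alt (n : Int) : Bool :=
  decide (2 ≤ n) && (PySem.List.pyRange 2 n 1).all (fun d => PySem.Int.mod n d != 0)

def find_coprime_prime_alt (phi : Int) : Int :=
  if phi < 2 then 0   -- raise ValueError (outside Pre_)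
  else
    match (PySem.List.pyRange 2 (phi + 2) 1).find?
        (fun p => is_prime_alt p && PySem.Int.mod phi p != 0) with
    | some p => p
    | none => 0       -- raise RuntimeError (unreachable for phi ≥ 2)

-- ===== PRECONDITION & SPEC =====
-- Pre_ excludes phi < 2 (A raises ValueError) and phi = 2 (A raises RuntimeError: every
-- prime ≤ 2 divides 2); A returns a value exactly when phi ≥ 3.
def Pre_find_coprime_prime (phi : Int) : Prop := 3 ≤ phi
instance (phi : Int) : Decidable (Pre_find_coprime_prime phi) := by
  unfold Pre_find_coprime_prime; infer_instance

def pvWitness_find_coprime_prime : Int := 12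

-- For phi = 2 A raises RuntimeError (no prime ≤ 2 is coprime to 2) while B returns 3,
-- the smallest prime coprime to 2.
def Raises_find_coprime_prime (phi : Int) : Prop := phi = 2
instance (phi : Int) : Decidable (Raises_find_coprime_prime phi) := by
  unfold Raises_find_coprime_prime; infer_instance
def pvRaiseWitness_find_coprime_prime : Int := 2
def pvRaiseWitnessOut_find_coprime_prime : Int := 3

def Spec_find_coprime_prime (phi : Int) (out : Int) : Prop := out = find_coprime_prime_alt phi
instance (phi : Int) (out : Int) : Decidable (Spec_find_coprime_prime phi out) := by
  unfold Spec_find_coprime_prime; infer_instance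

-- ===== CLAIM (what is proved, stated in full; the proofs are below) =====
def Claim_equal_find_coprime_prime : Prop := ∀ (phi : Int), Dom_find_coprime_prime phi → Pre_find_coprime_prime phi → Spec_find_coprime_prime phi (find_coprime_prime phi)

def Claim_raises_find_coprime_prime : Prop := (∀ (phi : Int), Dom_find_coprime_prime phi → Raises_find_coprime_prime phi → ¬ Pre_find_coprime_prime phi) ∧ (Dom_find_coprime_prime (pvRaiseWitness_find_coprime_prime) ∧ Raises_find_coprime_prime (pvRaiseWitness_find_coprime_prime) ∧ find_coprime_prime_alt (pvRaiseWitness_find_coprime_prime) = pvRaiseWitnessOut_find_coprime_prime)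


-- ===== LEMMAS AND PROOFS =====

-- getD with default false through setIfInBounds
theorem getD_set_false (a : Array Bool) (m i : Nat) :
    (a.setIfInBounds m false).getD i false = if i = m then false else a.getD i false := by
  simp only [Array.getD_eq_getD_getElem?, Array.getElem?_setIfInBounds]
  by_cases h : i = m
  · subst h
    by_cases hs : i < a.size <;> simp [hs]
  · have hmi : m ≠ i := fun hh => h hh.symm
    simp [h, hmi]

-- what the inner marking loop does to each cell
theorem pyMark_getD (isp : Array Bool) (m step limit i : Nat) :
    (pyMark isp m step limit).getD i false =
      if 0 < step ∧ m ≤ i ∧ i ≤ limit ∧ step ∣ (i - m) then false else isp.getD i false := by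
  fun_induction pyMark isp m step limit with
  | case1 isp m h ih =>
      rw [ih, getD_set_false]
      by_cases him : i = m
      · have hcond : 0 < step ∧ m ≤ i ∧ i ≤ limit ∧ step ∣ (i - m) :=
          ⟨h.1, by omega, by omega, by simp [him]⟩
        have hcond' : ¬ (0 < step ∧ m + step ≤ i ∧ i ≤ limit ∧ step ∣ (i - (m + step))) := by
          rintro ⟨h1, h2, _, _⟩; omega
        rw [if_neg hcond', if_pos him, if_pos hcond]
      · simp only [if_neg him]
        by_cases hc : 0 < step ∧ m + step ≤ i ∧ i ≤ limit ∧ step ∣ (i - (m + step))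
        · have : 0 < step ∧ m ≤ i ∧ i ≤ limit ∧ step ∣ (i - m) := by
            obtain ⟨h1, h2, h3, h4⟩ := hc
            refine ⟨h1, by omega, h3, ?_⟩
            have he : i - m = (i - (m + step)) + step := by omega
            rw [he]; exact Nat.dvd_add h4 dvd_rfl
          simp [hc, this]
        · have : ¬ (0 < step ∧ m ≤ i ∧ i ≤ limit ∧ step ∣ (i - m)) := by
            rintro ⟨h1, h2, h3, h4⟩
            apply hc
            have hge : m + step ≤ i := by
              rcases Nat.lt_or_ge (i - m) step with hlt | hge
              · have : i - m = 0 := Nat.eq_zero_of_dvd_of_lt h4 hlt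
                omega
              · omega
            exact ⟨h1, hge, h3, by
              have he : i - (m + step) = (i - m) - step := by omega
              rw [he]; exact Nat.dvd_sub h4 dvd_rfl⟩
          simp [hc, this]
  | case2 isp m h =>
      have : ¬ (0 < step ∧ m ≤ i ∧ i ≤ limit ∧ step ∣ (i - m)) := by
        rintro ⟨h1, h2, h3, _⟩; exact h ⟨h1, by omega⟩
      simp [this]

-- the sieve invariant: cell i survives iff no prime q < num kills it (q ∣ i with q*q ≤ i)
def sieveInv (limit num : Nat) (isp : Array Bool) : Prop :=
  ∀ i, i ≤ limit →
    (isp.getD i false = true ↔ 2 ≤ i ∧ ∀ q, q < num → Nat.Prime q → q ∣ i → i < q * q)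

theorem sieveInv_prime (limit num : Nat) (isp : Array Bool)
    (hinv : sieveInv limit num isp) (hle : num ≤ limit) :
    isp.getD num false = true ↔ Nat.Prime num := by
  rw [hinv num hle]
  constructor
  · rintro ⟨h2, hq⟩
    by_contra hnp
    have hsq : Nat.minFac num ^ 2 ≤ num := Nat.minFac_sq_le_self (by omega) hnp
    have hpr : Nat.Prime (Nat.minFac num) := Nat.minFac_prime (by omega)
    have hdvd : Nat.minFac num ∣ num := Nat.minFac_dvd num
    have hlt : Nat.minFac num < num := by
      have h1 : 2 ≤ Nat.minFac num := hpr.two_le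
      nlinarith [hsq]
    have := hq _ hlt hpr hdvd
    nlinarith [hsq]
  · intro hp
    refine ⟨hp.two_le, fun q hq hqp hdvd => ?_⟩
    rcases (Nat.Prime.eq_one_or_self_of_dvd hp q hdvd) with h | h
    · exact absurd h hqp.one_lt.ne'
    · omega

theorem sieveInv_step_prime (limit num : Nat) (isp : Array Bool)
    (hinv : sieveInv limit num isp) (hp : Nat.Prime num) :
    sieveInv limit (num + 1) (pyMark isp (num * num) num limit) := by
  intro i hi
  rw [pyMark_getD]
  have h2 : 2 ≤ num := hp.two_le
  by_cases hc : num * num ≤ i ∧ num ∣ i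
  · have hcc : 0 < num ∧ num * num ≤ i ∧ i ≤ limit ∧ num ∣ (i - num * num) := by
      refine ⟨by omega, hc.1, hi, ?_⟩
      exact Nat.dvd_sub hc.2 (Dvd.intro num rfl)
    rw [if_pos hcc]
    simp only [Bool.false_eq_true, false_iff, not_and]
    intro _
    rintro hq
    have := hq num (by omega) hp hc.2
    omega
  · have hcc : ¬ (0 < num ∧ num * num ≤ i ∧ i ≤ limit ∧ num ∣ (i - num * num)) := by
      rintro ⟨_, hm, _, hd⟩
      apply hc
      refine ⟨hm, ?_⟩
      have he : i = (i - num * num) + num * num := by omega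
      rw [he]; exact Nat.dvd_add hd (Dvd.intro num rfl)
    rw [if_neg hcc, hinv i hi]
    constructor
    · rintro ⟨hi2, hq⟩
      refine ⟨hi2, fun q hqlt hqp hqd => ?_⟩
      rcases Nat.lt_or_ge q num with h | h
      · exact hq q h hqp hqd
      · have : q = num := by omega
        subst this
        by_contra hge
        exact hc ⟨by omega, hqd⟩
    · rintro ⟨hi2, hq⟩
      exact ⟨hi2, fun q hqlt hqp hqd => hq q (by omega) hqp hqd⟩

theorem sieveInv_step_comp (limit num : Nat) (isp : Array Bool)
    (hinv : sieveInv limit num isp) (hp : ¬ Nat.Prime num) :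
    sieveInv limit (num + 1) isp := by
  intro i hi
  rw [hinv i hi]
  constructor
  · rintro ⟨hi2, hq⟩
    refine ⟨hi2, fun q hqlt hqp hqd => ?_⟩
    rcases Nat.lt_or_ge q num with h | h
    · exact hq q h hqp hqd
    · have heq : q = num := by omega
      rw [heq] at hqp; exact absurd hqp hp
  · rintro ⟨hi2, hq⟩
    exact ⟨hi2, fun q hqlt hqp hqd => hq q (by omega) hqp hqd⟩

theorem sitoLoop_eq (limit : Nat) : ∀ fuel num isp primes, limit + 1 - num ≤ fuel →
    sieveInv limit num isp →
    sitoLoop limit num isp primes =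
      primes ++ (List.range' num (limit + 1 - num)).filter (fun k => decide (Nat.Prime k)) := by
  intro fuel
  induction fuel with
  | zero =>
      intro num isp primes hf _
      rw [sitoLoop]
      have : ¬ num ≤ limit := by omega
      simp [this, show limit + 1 - num = 0 by omega]
  | succ fuel ih =>
      intro num isp primes hf hinv
      rw [sitoLoop]
      by_cases h : num ≤ limit
      · have hrange : limit + 1 - num = (limit - num) + 1 := by omega
        rw [hrange, List.range'_succ]
        by_cases hg : isp.getD num false
        · have hp : Nat.Prime num := (sieveInv_prime limit num isp hinv h).mp hg
          rw [dif_pos h, if_pos hg,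
            ih (num + 1) _ (primes ++ [num]) (by omega) (sieveInv_step_prime limit num isp hinv hp)]
          simp [hp, show limit + 1 - (num + 1) = limit - num by omega]
        · have hp : ¬ Nat.Prime num := fun hp =>
            hg ((sieveInv_prime limit num isp hinv h).mpr hp)
          rw [dif_pos h, if_neg hg,
            ih (num + 1) _ primes (by omega) (sieveInv_step_comp limit num isp hinv hp)]
          simp [hp, show limit + 1 - (num + 1) = limit - num by omega]
      · rw [dif_neg h]
        simp [show limit + 1 - num = 0 by omega]

theorem sito_eq (limit : Nat) :
    sito limit = (List.range' 2 (limit - 1)).filter (fun k => decide (Nat.Prime k)) := by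
  have hinv : sieveInv limit 2
      (((Array.replicate (limit + 1) true).setIfInBounds 0 false).setIfInBounds 1 false) := by
    intro i hi
    rw [getD_set_false, getD_set_false]
    have hrep : (Array.replicate (limit + 1) true).getD i false = true := by
      simp [Array.getD_eq_getD_getElem?, Nat.lt_succ_of_le hi]
    constructor
    · intro hg
      by_cases h1 : i = 1
      · rw [if_pos h1] at hg; exact absurd hg (by simp)
      · rw [if_neg h1] at hg
        by_cases h0 : i = 0
        · rw [if_pos h0] at hg; exact absurd hg (by simp)
        · rw [if_neg h0] at hg
          exact ⟨by omega, fun q hq hqp _ => absurd hqp (by interval_cases q <;> decide)⟩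
    · rintro ⟨h2, _⟩
      rw [if_neg (by omega), if_neg (by omega)]
      exact hrep
  rw [sito, sitoLoop_eq limit (limit + 1) 2 _ [] (by omega) hinv]
  simp [show limit + 1 - 2 = limit - 1 by omega]

-- B's trial-division test is Nat primality
theorem is_prime_alt_natCast (k : Nat) : is_prime_alt (k : Int) = decide (Nat.Prime k) := by
  unfold is_prime_alt
  rw [PySem.List.pyRange_one]
  have hall : ∀ j : Nat, (PySem.Int.mod (k : Int) ((2 : Int) + (j : Int)) != 0) =
      decide (¬ (2 + j) ∣ k) := by
    intro j
    have : (2 : Int) + (j : Int) = ((2 + j : Nat) : Int) := by push_cast; ring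
    rw [this, PySem.Int.mod_natCast]
    by_cases h : (2 + j) ∣ k
    · obtain ⟨c, rfl⟩ := h
      simp [Nat.mul_mod_right]
    · have h0 : (2 + j) * (k / (2 + j)) ≠ k := fun hh => h (Dvd.intro _ hh)
      have hne : k % (2 + j) ≠ 0 := fun hh => h (Nat.dvd_of_mod_eq_zero hh)
      simp [h]
      exact_mod_cast h
  rcases Nat.lt_or_ge k 2 with hk | hk
  · have : ¬ Nat.Prime k := by interval_cases k <;> decide
    simp [this, show ¬ (2 : Int) ≤ (k : Int) by exact_mod_cast by omega]
  · have h2 : ((k : Int) - 2).toNat = k - 2 := by omega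
    rw [h2]
    have hprime : Nat.Prime k ↔ (2 ≤ k ∧ ∀ m, 2 ≤ m → m < k → ¬ m ∣ k) := by
      rw [Nat.prime_def_lt']
    rw [Bool.eq_iff_iff]
    simp only [Bool.and_eq_true, decide_eq_true_eq, List.all_eq_true, List.mem_map,
      List.mem_range]
    constructor
    · rintro ⟨hk2, hall2⟩
      rw [Nat.prime_def_lt']
      refine ⟨hk, fun m hm2 hmk hdvd => ?_⟩
      have hx := hall2 ((2 : Int) + ((m - 2 : Nat) : Int)) ⟨m - 2, by omega, rfl⟩
      rw [hall (m - 2)] at hx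
      rw [show 2 + (m - 2) = m by omega] at hx
      exact (decide_eq_true_eq.mp hx) hdvd
    · intro hp
      refine ⟨by exact_mod_cast hk, ?_⟩
      rintro x ⟨j, hj, rfl⟩
      rw [hall j]
      have := (Nat.prime_def_lt'.mp hp).2 (2 + j) (by omega) (by omega)
      simp [this]



-- A's value as a find? over [2, n] (sieve replaced by its specification)
theorem findA (n : Nat) (h : 2 ≤ n) :
    find_coprime_prime (n : Int) =
      (match (List.range' 2 (n - 1)).find? (fun k => decide (Nat.Prime k) && !decide (k ∣ n)) with
       | some p => (p : Int) | none => 0) := by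
  unfold find_coprime_prime
  rw [if_neg (by exact_mod_cast not_lt.mpr (by exact_mod_cast h))]
  rw [show ((n : Int)).toNat = n from Int.toNat_natCast n]
  rw [sito_eq, List.find?_filter]
  have hpred : (fun a => decide ((decide (Nat.Prime a)) = true ∧ (Int.gcd (n : Int) (a : Int) == 1) = true))
      = (fun k => decide (Nat.Prime k) && !decide (k ∣ n)) := by
    funext a
    by_cases hp : Nat.Prime a
    · simp only [hp, decide_true, true_and, Bool.true_and, Int.gcd_natCast_natCast]
      rw [Nat.gcd_comm]
      by_cases hd : a ∣ n
      · have hg : Nat.gcd a n ≠ 1 := fun hc => (hp.coprime_iff_not_dvd.mp hc) hd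
        simp [hd, hg]
      · have hg : Nat.gcd a n = 1 := hp.coprime_iff_not_dvd.mpr hd
        simp [hd, hg]
    · simp [hp]
  rw [hpred]

-- B's value as the same find? over [2, n+1]
theorem findB (n : Nat) (h : 2 ≤ n) :
    find_coprime_prime_alt (n : Int) =
      (match (List.range' 2 n).find? (fun k => decide (Nat.Prime k) && !decide (k ∣ n)) with
       | some p => (p : Int) | none => 0) := by
  unfold find_coprime_prime_alt
  rw [if_neg (by exact_mod_cast not_lt.mpr (by exact_mod_cast h))]
  rw [PySem.List.pyRange_one]
  rw [show ((n : Int) + 2 - 2).toNat = n by omega]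
  have hmap : (List.range n).map (fun k : Nat => ((2 : Int) + (k : Int)))
      = (List.range' 2 n).map (fun k : Nat => (k : Int)) := by
    rw [List.range'_eq_map_range, List.map_map]
    rfl
  rw [hmap, List.find?_map]
  have hpred : ((fun p : Int => is_prime_alt p && (PySem.Int.mod (n : Int) p != 0)) ∘ (fun k : Nat => (k : Int)))
      = (fun k : Nat => decide (Nat.Prime k) && !decide (k ∣ n)) := by
    funext k
    simp only [Function.comp_apply, is_prime_alt_natCast, PySem.Int.mod_natCast]
    by_cases hd : k ∣ n
    · obtain ⟨c, hc⟩ := hd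
      have h0 : n % k = 0 := by rw [hc]; exact Nat.mul_mod_right k c
      simp [hc]
    · have h0 : n % k ≠ 0 := fun hh => hd (Nat.dvd_of_mod_eq_zero hh)
      simp [hd, h0]
      exact fun _ => by exact_mod_cast hd
  rw [hpred]
  cases (List.range' 2 n).find? (fun k => decide (Nat.Prime k) && !decide (k ∣ n)) <;> simp

-- for n ≥ 3 some prime ≤ n does not divide n (via Bertrand when n is even)
theorem exists_good (n : Nat) (h : 3 ≤ n) : ∃ p, 2 ≤ p ∧ p ≤ n ∧ Nat.Prime p ∧ ¬ p ∣ n := by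
  by_cases h2 : 2 ∣ n
  · obtain ⟨q, hqp, hq1, hq2⟩ := Nat.exists_prime_lt_and_le_two_mul (n / 2) (by omega)
    refine ⟨q, hqp.two_le, by omega, hqp, ?_⟩
    intro hd
    obtain ⟨c, hc⟩ := hd
    rcases Nat.lt_or_ge c 2 with hcl | hcg
    · interval_cases c
      · omega
      · rw [Nat.mul_one] at hc
        rcases Nat.Prime.eq_one_or_self_of_dvd hqp 2 (hc ▸ h2) with hq | hq
        · omega
        · have := hqp.two_le; omega
    · have hmul : q * 2 ≤ q * c := Nat.mul_le_mul_left q hcg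
      rw [← hc] at hmul
      omega
  · exact ⟨2, le_refl 2, by omega, Nat.prime_two, h2⟩

-- ===== VERDICT (by name: the statement is the Claim_ definition above) =====
theorem find_coprime_prime_spec : Claim_equal_find_coprime_prime := by
  intro phi _ hpre
  unfold Pre_find_coprime_prime at hpre
  unfold Spec_find_coprime_prime
  have hn3 : 3 ≤ phi.toNat := by omega
  have hphi : phi = (phi.toNat : Int) := by omega
  rw [hphi, findA phi.toNat (by omega), findB phi.toNat (by omega)]
  have hsplit : List.range' 2 phi.toNat = List.range' 2 (phi.toNat - 1) ++ [phi.toNat + 1] := by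
    conv_lhs => rw [show phi.toNat = (phi.toNat - 1) + 1 by omega]
    rw [List.range'_concat]
    rw [show 2 + 1 * (phi.toNat - 1) = phi.toNat + 1 by omega]
  obtain ⟨p, hp2, hpn, hpp, hpd⟩ := exists_good phi.toNat hn3
  have hmem : p ∈ List.range' 2 (phi.toNat - 1) := by
    rw [List.mem_range'_1]; exact ⟨hp2, by omega⟩
  have hsome : ((List.range' 2 (phi.toNat - 1)).find?
      (fun k => decide (Nat.Prime k) && !decide (k ∣ phi.toNat))).isSome := by
    rw [List.find?_isSome]
    exact ⟨p, hmem, by simp [hpp, hpd]⟩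
  obtain ⟨x, hx⟩ := Option.isSome_iff_exists.mp hsome
  rw [hsplit, List.find?_append, hx]
  simp

@[simp] theorem find_coprime_prime_raises : Claim_raises_find_coprime_prime := by
  unfold Claim_raises_find_coprime_prime
  exact ⟨fun phi _ h => by simp [Raises_find_coprime_prime] at h; simp [Pre_find_coprime_prime, h], by decide⟩
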